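-- pv_equiv track=rewrite | github.com/karpov78/rosalind-algo | python/pdpl.py | remove
-- ===== SOURCE A (Python) =====
-- def remove(s, x, start=0, end=None):
--     if not end: end = len(s) - 1
--
--     if end - start <= 1:
--         if s[start] == x:
--             del s[start]
--         elif s[end] == x:
--             del s[end]
--         else:
--             return False
--         return True
--
--     mid = int((end + start) / 2)
--     if s[mid] == x:
--         del s[mid]
--         return True
--     elif s[mid] > x:
--         return remove(s, x, start, mid)
--     else:
--         return remove(s, x, mid, end)
-- ===== SOURCE B (Python) =====
-- def remove(s, x, start=0, end=None):
--     if not end: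
--         end = len(s) - 1
--     while end - start > 1:
--         mid = (start + end) // 2
--         if s[mid] == x:
--             del s[mid]
--             return True
--         if s[mid] > x:
--             end = mid
--         else:
--             start = mid
--     if s[start] == x:
--         del s[start]
--         return True
--     if s[end] == x:
--         del s[end]
--         return True
--     return False
-- ===== Notes on version B (the rewrite author's own statement) =====
-- stated objective: idiomatic
-- what changed: The tail recursion over the (start, end) window is rewritten as a flat iterative while-loop maintaining the window, with the base-case check run once after the loop.
-- outside the precondition, e.g. on remove([1, 2, 3], 3, -2, 1): A returns False, B returns True
import Mathlib
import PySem

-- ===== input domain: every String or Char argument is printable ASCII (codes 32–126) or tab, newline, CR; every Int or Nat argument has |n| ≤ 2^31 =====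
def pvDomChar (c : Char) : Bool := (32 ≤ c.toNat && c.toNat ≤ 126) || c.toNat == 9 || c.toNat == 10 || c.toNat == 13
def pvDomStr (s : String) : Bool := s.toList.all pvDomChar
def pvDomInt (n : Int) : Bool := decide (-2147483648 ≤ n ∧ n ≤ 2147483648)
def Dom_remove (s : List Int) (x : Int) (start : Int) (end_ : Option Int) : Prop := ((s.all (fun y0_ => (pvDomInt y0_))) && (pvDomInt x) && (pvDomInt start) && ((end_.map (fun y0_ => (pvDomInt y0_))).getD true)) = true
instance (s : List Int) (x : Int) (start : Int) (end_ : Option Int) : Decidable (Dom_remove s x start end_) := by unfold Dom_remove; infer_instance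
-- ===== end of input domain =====

-- B replaces A's tail recursion over the (start,end) window by a flat iterative loop
-- (same window updates, base-case block run once after the loop); return value only —
-- both Pythons perform the identical single in-place deletion of the found element.


-- ===== PORT A =====
-- `if not end: end = len(s) - 1`: end is falsy when it is None or 0.
def effEnd (s : List Int) (end_ : Option Int) : Int :=
  match end_ with
  | none => (s.length : Int) - 1
  | some e0 => if e0 = 0 then (s.length : Int) - 1 else e0

-- Literal port of A's recursion, with fuel making it total (Python A can recurse forever
-- outside Pre_, because the `not end` reset can re-fire when a recursive call passes
-- end = 0; inside Pre_ the fuel s.length + 2 is never exhausted).  An IndexError is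
-- rendered as `false` (those inputs are outside Pre_).  `int((end+start)/2)` truncates
-- toward zero, hence Int.tdiv.
def removeFuel (fuel : Nat) (s : List Int) (x : Int) (start : Int) (end_ : Option Int) : Bool :=
  match fuel with
  | 0 => false
  | fuel + 1 =>
    if effEnd s end_ - start ≤ 1 then
      match PySem.List.pyGet? s start with
      | none => false                                   -- IndexError at s[start]
      | some v =>
        if v = x then true                              -- del s[start]; return True
        else
          match PySem.List.pyGet? s (effEnd s end_) with
          | none => false                               -- IndexError at s[end]
          | some w => if w = x then true else false     -- del s[end] / return False
    else
      match PySem.List.pyGet? s ((start + effEnd s end_).tdiv 2) with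
      | none => false                                   -- IndexError at s[mid]
      | some v =>
        if v = x then true                              -- del s[mid]; return True
        else if v > x then removeFuel fuel s x start (some ((start + effEnd s end_).tdiv 2))
        else removeFuel fuel s x ((start + effEnd s end_).tdiv 2) end_

def remove (s : List Int) (x : Int) (start : Int) (end_ : Option Int) : Bool :=
  removeFuel (s.length + 2) s x start end_

-- ===== PORT B =====
-- Port of B's while-loop: `removeAltLoop` is the loop (fuel-totalised); it returns
-- `none` when the loop deleted s[mid] and returned True, otherwise the final window.
-- An IndexError inside the loop (outside Pre_) is rendered as the current window.
def removeAltLoop (fuel : Nat) (s : List Int) (x : Int) (start e : Int) : Option (Int × Int) :=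
  match fuel with
  | 0 => some (start, e)
  | fuel + 1 =>
    if e - start > 1 then
      match PySem.List.pyGet? s (PySem.Int.floordiv (start + e) 2) with
      | none => some (start, e)
      | some v =>
        if v = x then none                              -- del s[mid]; return True
        else if v > x then removeAltLoop fuel s x start (PySem.Int.floordiv (start + e) 2)
        else removeAltLoop fuel s x (PySem.Int.floordiv (start + e) 2) e
    else some (start, e)

def remove_alt (s : List Int) (x : Int) (start : Int) (end_ : Option Int) : Bool :=
  match removeAltLoop (s.length + 2) s x start (effEnd s end_) with
  | none => true
  | some (st, en) =>
    match PySem.List.pyGet? s st with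
    | none => false
    | some v =>
      if v = x then true
      else
        match PySem.List.pyGet? s en with
        | none => false
        | some w => w = x

-- ===== PRECONDITION & SPEC =====
-- Pre_ excludes the empty list and windows that both reach the binary-search loop and
-- lie outside [0, len(s)-1]: there A either raises IndexError or its result depends on
-- Python's accidental negative-index wraparound (and on the `not end` reset re-firing
-- mid-recursion).  One-step windows with in-range (possibly negative) indices stay in.
def Pre_remove (s : List Int) (x : Int) (start : Int) (end_ : Option Int) : Prop :=
  (0 ≤ start ∧ start ≤ effEnd s end_ ∧ effEnd s end_ ≤ (s.length : Int) - 1) ∨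
  (effEnd s end_ - start ≤ 1 ∧
    -(s.length : Int) ≤ start ∧ start < (s.length : Int) ∧
    -(s.length : Int) ≤ effEnd s end_ ∧ effEnd s end_ < (s.length : Int))
instance (s : List Int) (x : Int) (start : Int) (end_ : Option Int) : Decidable (Pre_remove s x start end_) := by unfold Pre_remove; infer_instance

def pvWitness_remove : List Int × Int × Int × Option Int := ([1, 2, 3, 5, 8], 5, 0, none)

def Spec_remove (s : List Int) (x : Int) (start : Int) (end_ : Option Int) (out : Bool) : Prop := out = remove_alt s x start end_
instance (s : List Int) (x : Int) (start : Int) (end_ : Option Int) (out : Bool) : Decidable (Spec_remove s x start end_ out) := by unfold Spec_remove; infer_instance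

-- ===== CLAIM (what is proved, stated in full; the proofs are below) =====
def Claim_equal_remove : Prop := ∀ (s : List Int) (x : Int) (start : Int) (end_ : Option Int), Dom_remove s x start end_ → Pre_remove s x start end_ → Spec_remove s x start end_ (remove s x start end_)

-- ===== LEMMAS AND PROOFS =====

-- Inside an admitted window 0 ≤ start ≤ e ≤ len-1, A's recursion and B's loop walk the
-- same midpoints: every end A passes down is ≥ 1, so the `not end` reset never re-fires
-- and tdiv coincides with floordiv.
lemma removeFuel_eq_loop (fuel : Nat) :
    ∀ (s : List Int) (x start : Int) (end_ : Option Int) (e : Int),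
      effEnd s end_ = e →
      0 ≤ start → start ≤ e → e ≤ (s.length : Int) - 1 → e - start < (fuel : Int) + 1 →
      removeFuel (fuel + 1) s x start end_ =
        (match removeAltLoop (fuel + 1) s x start e with
         | none => true
         | some (st, en) =>
           match PySem.List.pyGet? s st with
           | none => false
           | some v =>
             if v = x then true
             else
               match PySem.List.pyGet? s en with
               | none => false
               | some w => (w = x : Bool)) := by
  induction fuel with
  | zero =>
    intro s x start end_ e he h0 h1 h2 hf
    have hb : e - start ≤ 1 := by omega
    have hb' : ¬ e - start > 1 := by omega
    simp only [removeFuel, removeAltLoop, he, hb, if_true, hb', if_false]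
    cases PySem.List.pyGet? s start with
    | none => rfl
    | some v =>
      by_cases hv : v = x
      · simp [hv]
      · simp only [hv, if_false]
        cases PySem.List.pyGet? s e with
        | none => rfl
        | some w => simp
  | succ fuel ih =>
    intro s x start end_ e he h0 h1 h2 hf
    conv_lhs => rw [removeFuel]
    conv_rhs => rw [removeAltLoop]
    rw [he]
    by_cases hb : e - start ≤ 1
    · have hb' : ¬ e - start > 1 := by omega
      simp only [hb, if_true, hb', if_false]
      cases PySem.List.pyGet? s start with
      | none => rfl
      | some v =>
        by_cases hv : v = x
        · simp [hv]
        · simp only [hv, if_false]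
          cases PySem.List.pyGet? s e with
          | none => rfl
          | some w => simp
    · have hb' : e - start > 1 := by omega
      have hfd : PySem.Int.floordiv (start + e) 2 = (start + e) / 2 :=
        PySem.Int.floordiv_eq_ediv_of_pos (by omega)
      have hmid : (start + e).tdiv 2 = PySem.Int.floordiv (start + e) 2 := by
        rw [hfd, Int.tdiv_eq_ediv_of_nonneg (by omega)]
      have hmb : start < PySem.Int.floordiv (start + e) 2 ∧
          PySem.Int.floordiv (start + e) 2 < e := by rw [hfd]; omega
      have hm0 : PySem.Int.floordiv (start + e) 2 ≠ 0 := by rw [hfd]; omega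
      simp only [hb, if_false, hb', if_true, hmid]
      cases hg : PySem.List.pyGet? s (PySem.Int.floordiv (start + e) 2) with
      | none =>
        exfalso
        rw [PySem.List.pyGet?_eq_none_iff] at hg
        exact hg (by unfold PySem.Raise.InRange; omega)
      | some v =>
        by_cases hv : v = x
        · simp [hv]
        · by_cases hgt : v > x
          · simp only [hv, if_false, hgt, if_true]
            exact ih s x start (some (PySem.Int.floordiv (start + e) 2))
              (PySem.Int.floordiv (start + e) 2)
              (by simp only [effEnd]; rw [if_neg hm0]) h0 (by omega) (by omega) (by omega)
          · simp only [hv, if_false, hgt]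
            exact ih s x (PySem.Int.floordiv (start + e) 2) end_ e he (by omega) (by omega) h2
              (by omega)

-- ===== VERDICT (by name: the statement is the Claim_ definition above) =====
-- On a one-step window the recursion and the loop never start: both sides are the
-- very same base-case block, whatever the (possibly negative) indices hold.
lemma base_eq (s : List Int) (x start : Int) (end_ : Option Int)
    (hb : effEnd s end_ - start ≤ 1) :
    remove s x start end_ = remove_alt s x start end_ := by
  unfold remove remove_alt
  show removeFuel (s.length + 1 + 1) s x start end_ = _
  conv_lhs => rw [removeFuel]
  conv_rhs => rw [show s.length + 2 = s.length + 1 + 1 from rfl, removeAltLoop]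
  have hb' : ¬ effEnd s end_ - start > 1 := by omega
  simp only [hb, if_true, hb', if_false]
  cases PySem.List.pyGet? s start with
  | none => rfl
  | some v =>
    by_cases hv : v = x
    · simp [hv]
    · simp only [hv, if_false]
      cases PySem.List.pyGet? s (effEnd s end_) with
      | none => rfl
      | some w => simp

theorem remove_spec : Claim_equal_remove := by
  unfold Claim_equal_remove
  intro s x start end_ _ hpre
  unfold Spec_remove
  rcases hpre with ⟨h0, h1, h2⟩ | ⟨hb, _, _, _, _⟩
  · unfold remove remove_alt
    exact removeFuel_eq_loop (s.length + 1) s x start end_ (effEnd s end_) rfl h0 h1 h2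
      (by push_cast; omega)
  · exact base_eq s x start end_ hb
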